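-- pv_equiv track=rewrite | github.com/Kosmic-Development-Team/LambdaPlusPlus-Bot | bot/commands.py | _remove_discord_coding_modifier
-- ===== SOURCE A (Python) =====
-- def _remove_discord_coding_modifier(msg):  # i.e. removes all unescaped graves (`)
--     msg_split = msg.split('\\\\')
--     new_msg = ''
--     first = True
--     for ms in msg_split:
--         ms = _remove_unescaped_graves(ms)
--         if not first:
--             new_msg += '\\\\'
--         else:
--             first = False
--         new_msg += ms
--     return new_msg
--
-- def _remove_unescaped_graves(msg):
--     msg_split = msg.split('\\`')
--     new_msg = ''
--     first = True
--     for ms in msg_split: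
--         ms = ms.replace('`', '')
--         if not first:
--             new_msg += '\\`'
--         else:
--             first = False
--         new_msg += ms
--     return new_msg
-- ===== SOURCE B (Python) =====
-- def _remove_discord_coding_modifier(msg):
--     # Single left-to-right scan: a backslash escapes the next character
--     # (kept verbatim); an unescaped backtick is dropped.
--     out = []
--     i = 0
--     n = len(msg)
--     while i < n:
--         ch = msg[i]
--         if ch == '\\':
--             out.append(ch)
--             if i + 1 < n:
--                 out.append(msg[i + 1])
--                 i += 2
--             else:
--                 i += 1
--         elif ch == '`':
--             i += 1
--         else:
--             out.append(ch)
--             i += 1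
--     return ''.join(out)
-- ===== Notes on version B (the rewrite author's own statement) =====
-- stated objective: simpler
-- what changed: Replaces A's two nested split/join passes (split on '\\\\', helper split on '\\`' plus replace) with a single left-to-right scan that copies any backslash-escaped pair verbatim and skips unescaped backticks.
import Mathlib
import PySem

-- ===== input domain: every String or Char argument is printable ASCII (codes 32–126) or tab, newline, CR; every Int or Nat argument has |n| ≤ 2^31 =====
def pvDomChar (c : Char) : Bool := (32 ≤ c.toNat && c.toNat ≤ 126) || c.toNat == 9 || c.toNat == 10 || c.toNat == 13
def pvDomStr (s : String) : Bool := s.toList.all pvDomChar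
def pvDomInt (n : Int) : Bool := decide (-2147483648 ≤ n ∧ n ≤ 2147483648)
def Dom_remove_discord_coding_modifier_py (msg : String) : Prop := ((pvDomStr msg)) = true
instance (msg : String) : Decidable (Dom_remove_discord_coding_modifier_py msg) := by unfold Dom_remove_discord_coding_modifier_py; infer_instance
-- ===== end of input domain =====

-- B replaces A's two nested split/join passes (and its helper) by one left-to-right escape-aware scan: simpler, a single pass.

-- ===== PORT A =====
-- helper _remove_unescaped_graves, transliterated on List Char (PySem.Str.* are thin wrappers over PySem.Chars.*)
def removeUnescapedGravesC (msg : List Char) : List Char :=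
  let msg_split := PySem.Chars.splitOn msg ['\\', '`']
  (msg_split.foldl (fun (st : Bool × List Char) ms =>
      let ms := PySem.Chars.replace ms ['`'] []
      let acc := if st.1 = false then st.2 ++ ['\\', '`'] else st.2
      (false, acc ++ ms)) (true, [])).2

def removeDiscordC (msg : List Char) : List Char :=
  let msg_split := PySem.Chars.splitOn msg ['\\', '\\']
  (msg_split.foldl (fun (st : Bool × List Char) ms =>
      let ms := removeUnescapedGravesC ms
      let acc := if st.1 = false then st.2 ++ ['\\', '\\'] else st.2
      (false, acc ++ ms)) (true, [])).2

def remove_discord_coding_modifier_py (msg : String) : String :=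
  String.ofList (removeDiscordC msg.toList)

-- ===== PORT B =====
-- one pass: a backslash emits itself and (if present) the following char; an unescaped backtick is skipped
def scanC : List Char → List Char
  | [] => []
  | c :: rest =>
    if c = '\\' then
      match rest with
      | [] => ['\\']
      | d :: rest' => '\\' :: d :: scanC rest'
    else if c = '`' then scanC rest
    else c :: scanC rest

def remove_discord_coding_modifier_py_alt (msg : String) : String :=
  String.ofList (scanC msg.toList)

-- ===== PRECONDITION & SPEC =====
def Spec_remove_discord_coding_modifier_py (msg : String) (out : String) : Prop := out = remove_discord_coding_modifier_py_alt msg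
instance (msg : String) (out : String) : Decidable (Spec_remove_discord_coding_modifier_py msg out) := by unfold Spec_remove_discord_coding_modifier_py; infer_instance

-- ===== CLAIM (what is proved, stated in full; the proofs are below) =====
def Claim_equal_remove_discord_coding_modifier_py : Prop := ∀ (msg : String), Dom_remove_discord_coding_modifier_py msg → Spec_remove_discord_coding_modifier_py msg (remove_discord_coding_modifier_py msg)

-- ===== LEMMAS AND PROOFS =====

-- replace with old=['`'], new=[] is filter
theorem replace_go_filter : ∀ (l : List Char) (fuel : Nat) (acc : List Char), l.length ≤ fuel →
    PySem.Chars.replace.go ['`'] [] fuel l acc = acc.reverse ++ l.filter (fun x => !(x == '`')) := by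
  intro l
  induction l with
  | nil => intro fuel acc _; cases fuel <;> simp [PySem.Chars.replace.go]
  | cons c t ih =>
    intro fuel acc h
    cases fuel with
    | zero => simp at h
    | succ f =>
      simp only [PySem.Chars.replace.go]
      by_cases hc : c = '`'
      · have hp : List.isPrefixOf ['`'] (c :: t) = true := by simp [List.isPrefixOf, hc]
        simp only [List.reverse_nil, List.nil_append, List.filter_cons, hc]
        simp only [BEq.rfl, Bool.not_true, Bool.false_eq_true, if_false]
        exact ih f acc (by simpa using h)
      · have hp : List.isPrefixOf ['`'] (c :: t) = false := by
          simp [List.isPrefixOf]; exact fun h' => hc h'.symm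
        simp only [hp]
        rw [if_neg (by simp)]
        rw [ih f _ (by simpa using h)]
        simp [hc]

theorem replace_filter (l : List Char) :
    PySem.Chars.replace l ['`'] [] = l.filter (fun x => !(x == '`')) := by
  simp [PySem.Chars.replace, replace_go_filter l l.length [] (le_refl _)]

theorem go_acc (sep : List Char) : ∀ (fuel : Nat) (l cur : List Char) (acc : List (List Char)),
    PySem.Chars.splitOn.go sep fuel l cur acc
      = acc.reverse ++ (PySem.Chars.splitOn.go sep fuel l [] []).modifyHead (cur.reverse ++ ·) := by
  intro fuel
  induction fuel with
  | zero => intro l cur acc; simp [PySem.Chars.splitOn.go]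
  | succ f ih =>
    intro l cur acc
    cases l with
    | nil => simp [PySem.Chars.splitOn.go]
    | cons c rest =>
      simp only [PySem.Chars.splitOn.go]
      by_cases hp : sep.isPrefixOf (c :: rest) = true
      · simp only [hp, if_true]
        rw [ih _ [] (cur.reverse :: acc), ih _ [] [[].reverse]]
        cases PySem.Chars.splitOn.go sep f (List.drop sep.length (c :: rest)) [] [] <;> simp
      · simp only [hp, if_false, Bool.false_eq_true]
        rw [ih rest (c :: cur) acc, ih rest [c] []]
        cases PySem.Chars.splitOn.go sep f rest [] [] <;> simp

theorem go_ne_nil (sep : List Char) : ∀ (fuel : Nat) (l cur : List Char) (acc : List (List Char)),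
    PySem.Chars.splitOn.go sep fuel l cur acc ≠ [] := by
  intro fuel
  induction fuel with
  | zero => intro l cur acc; simp [PySem.Chars.splitOn.go]
  | succ f ih =>
    intro l cur acc
    cases l with
    | nil => simp [PySem.Chars.splitOn.go]
    | cons c rest =>
      simp only [PySem.Chars.splitOn.go]
      by_cases hp : sep.isPrefixOf (c :: rest) = true
      · simp only [hp, if_true]; exact ih _ _ _
      · simp only [hp, if_false, Bool.false_eq_true]; exact ih _ _ _

theorem splitOn_ne_nil (l sep : List Char) : PySem.Chars.splitOn l sep ≠ [] :=
  go_ne_nil sep _ l [] []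

theorem go_eq_splitOn (sep : List Char) (hsep : sep ≠ []) :
    ∀ (n : Nat) (l : List Char) (fuel : Nat), l.length ≤ n → l.length < fuel →
    PySem.Chars.splitOn.go sep fuel l [] [] = PySem.Chars.splitOn l sep := by
  intro n
  induction n with
  | zero =>
    intro l fuel h1 h2
    have : l = [] := List.length_eq_zero_iff.mp (Nat.le_zero.mp h1)
    subst this
    cases fuel with
    | zero => omega
    | succ f => simp [PySem.Chars.splitOn, PySem.Chars.splitOn.go]
  | succ n ih =>
    intro l fuel h1 h2
    cases l with
    | nil =>
      cases fuel with
      | zero => omega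
      | succ f => simp [PySem.Chars.splitOn, PySem.Chars.splitOn.go]
    | cons c rest =>
      cases fuel with
      | zero => omega
      | succ f =>
      have hlen : (c :: rest).length + 1 = (c :: rest).length + 1 := rfl
      have hsl : 1 ≤ sep.length := by
        cases sep with
        | nil => exact absurd rfl hsep
        | cons _ _ => simp
      conv_rhs => rw [PySem.Chars.splitOn]
      simp only [PySem.Chars.splitOn.go, List.length_cons]
      by_cases hp : sep.isPrefixOf (c :: rest) = true
      · simp only [hp, if_true]
        rw [go_acc sep f _ [] [[].reverse], go_acc sep (rest.length+1) _ [] [[].reverse]]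
        have hd : (List.drop sep.length (c :: rest)).length ≤ n := by
          simp only [List.length_drop, List.length_cons] at *
          omega
        rw [ih _ f hd (by simp only [List.length_drop, List.length_cons] at *; omega),
            ih _ (rest.length+1) hd (by simp only [List.length_drop, List.length_cons] at *; omega)]
      · simp only [hp, if_false, Bool.false_eq_true]
        rw [go_acc sep f rest [c] [], go_acc sep (rest.length+1) rest [c] []]
        have hr : rest.length ≤ n := by simp at h1; omega
        rw [ih rest f hr (by simp at h2 ⊢; omega),
            ih rest (rest.length+1) hr (by simp)]

theorem splitOn_prefix (l sep : List Char) (hsep : sep ≠ []) (hp : sep.isPrefixOf l = true) :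
    PySem.Chars.splitOn l sep = [] :: PySem.Chars.splitOn (l.drop sep.length) sep := by
  have hsl : 1 ≤ sep.length := by
    cases sep with
    | nil => exact absurd rfl hsep
    | cons _ _ => simp
  cases l with
  | nil =>
    cases sep with
    | nil => exact absurd rfl hsep
    | cons s ss => simp [List.isPrefixOf] at hp
  | cons c rest =>
    conv_lhs => rw [PySem.Chars.splitOn]
    simp only [PySem.Chars.splitOn.go, List.length_cons, hp, if_true]
    rw [go_acc sep (rest.length+1) _ [] [[].reverse]]
    rw [go_eq_splitOn sep hsep (List.drop sep.length (c::rest)).length _ (rest.length+1) le_rfl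
        (by simp only [List.length_drop, List.length_cons]; omega)]
    cases PySem.Chars.splitOn (List.drop sep.length (c :: rest)) sep <;> simp

theorem splitOn_cons (c : Char) (cs sep : List Char) (hp : sep.isPrefixOf (c :: cs) = false) :
    PySem.Chars.splitOn (c :: cs) sep = (PySem.Chars.splitOn cs sep).modifyHead (c :: ·) := by
  have hsep : sep ≠ [] := by
    intro h; subst h; simp [List.isPrefixOf] at hp
  conv_lhs => rw [PySem.Chars.splitOn]
  simp only [PySem.Chars.splitOn.go, List.length_cons, hp, if_false, Bool.false_eq_true]
  rw [go_acc sep (cs.length+1) cs [c] []]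
  rw [go_eq_splitOn sep hsep cs.length cs (cs.length+1) le_rfl (by simp)]
  simp

-- A's join loop: folding over the split pieces with a (first, acc) flag equals flatMap with the separator
theorem loop_tail (f : List Char → List Char) (sep : List Char) :
    ∀ (ps : List (List Char)) (acc : List Char),
    (ps.foldl (fun (st : Bool × List Char) ms =>
        (false, (if st.1 = false then st.2 ++ sep else st.2) ++ f ms)) (false, acc)).2
      = acc ++ ps.flatMap (fun m => sep ++ f m) := by
  intro ps
  induction ps with
  | nil => intro acc; simp
  | cons p ps ih => intro acc; simp only [List.foldl_cons, ih, List.flatMap_cons]; simp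

theorem G_eq (cs p : List Char) (ps : List (List Char))
    (h : PySem.Chars.splitOn cs ['\\', '`'] = p :: ps) :
    removeUnescapedGravesC cs
      = p.filter (fun x => !(x == '`'))
        ++ ps.flatMap (fun m => ['\\', '`'] ++ m.filter (fun x => !(x == '`'))) := by
  unfold removeUnescapedGravesC
  rw [h]
  simp only [List.foldl_cons]
  have : ((true : Bool), ([] : List Char)).1 = true := rfl
  simp only [replace_filter, if_neg (by simp : ¬((true : Bool) = false)), List.nil_append]
  rw [loop_tail (fun m => m.filter (fun x => !(x == '`'))) ['\\', '`'] ps _]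

theorem F_eq (cs p : List Char) (ps : List (List Char))
    (h : PySem.Chars.splitOn cs ['\\', '\\'] = p :: ps) :
    removeDiscordC cs
      = removeUnescapedGravesC p
        ++ ps.flatMap (fun m => ['\\', '\\'] ++ removeUnescapedGravesC m) := by
  unfold removeDiscordC
  rw [h]
  simp only [List.foldl_cons]
  simp only [if_neg (by simp : ¬((true : Bool) = false)), List.nil_append]
  rw [loop_tail removeUnescapedGravesC ['\\', '\\'] ps _]

theorem G_esc (cs : List Char) :
    removeUnescapedGravesC ('\\' :: '`' :: cs) = '\\' :: '`' :: removeUnescapedGravesC cs := by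
  obtain ⟨p, ps, h⟩ : ∃ p ps, PySem.Chars.splitOn cs ['\\', '`'] = p :: ps := by
    cases h0 : PySem.Chars.splitOn cs ['\\', '`'] with
    | nil => exact absurd h0 (splitOn_ne_nil cs _)
    | cons p ps => exact ⟨p, ps, rfl⟩
  have hsp : PySem.Chars.splitOn ('\\' :: '`' :: cs) ['\\', '`']
      = [] :: p :: ps := by
    rw [splitOn_prefix _ _ (by simp) (by simp [List.isPrefixOf])]
    simpa using h
  rw [G_eq _ _ _ hsp, G_eq _ _ _ h]
  simp

theorem G_cons (c : Char) (cs : List Char)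
    (hp : List.isPrefixOf ['\\', '`'] (c :: cs) = false) :
    removeUnescapedGravesC (c :: cs)
      = (if c = '`' then [] else [c]) ++ removeUnescapedGravesC cs := by
  obtain ⟨p, ps, h⟩ : ∃ p ps, PySem.Chars.splitOn cs ['\\', '`'] = p :: ps := by
    cases h0 : PySem.Chars.splitOn cs ['\\', '`'] with
    | nil => exact absurd h0 (splitOn_ne_nil cs _)
    | cons p ps => exact ⟨p, ps, rfl⟩
  have hsp : PySem.Chars.splitOn (c :: cs) ['\\', '`'] = (c :: p) :: ps := by
    rw [splitOn_cons _ _ _ hp, h]; rfl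
  rw [G_eq _ _ _ hsp, G_eq _ _ _ h]
  by_cases hc : c = '`' <;> simp [hc]

theorem F_bb (cs : List Char) :
    removeDiscordC ('\\' :: '\\' :: cs) = '\\' :: '\\' :: removeDiscordC cs := by
  obtain ⟨p, ps, h⟩ : ∃ p ps, PySem.Chars.splitOn cs ['\\', '\\'] = p :: ps := by
    cases h0 : PySem.Chars.splitOn cs ['\\', '\\'] with
    | nil => exact absurd h0 (splitOn_ne_nil cs _)
    | cons p ps => exact ⟨p, ps, rfl⟩
  have hsp : PySem.Chars.splitOn ('\\' :: '\\' :: cs) ['\\', '\\'] = [] :: p :: ps := by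
    rw [splitOn_prefix _ _ (by simp) (by simp [List.isPrefixOf])]
    simpa using h
  rw [F_eq _ _ _ hsp, F_eq _ _ _ h]
  have : removeUnescapedGravesC [] = [] := by decide
  simp [this]

theorem F_cons (c : Char) (cs p : List Char) (ps : List (List Char))
    (hp : List.isPrefixOf ['\\', '\\'] (c :: cs) = false)
    (h : PySem.Chars.splitOn cs ['\\', '\\'] = p :: ps) :
    removeDiscordC (c :: cs)
      = removeUnescapedGravesC (c :: p)
        ++ ps.flatMap (fun m => ['\\', '\\'] ++ removeUnescapedGravesC m) := by
  have hsp : PySem.Chars.splitOn (c :: cs) ['\\', '\\'] = (c :: p) :: ps := by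
    rw [splitOn_cons _ _ _ hp, h]; rfl
  exact F_eq _ _ _ hsp

theorem scanC_cons (c : Char) (rest : List Char) (hc : ¬ c = '\\') :
    scanC (c :: rest) = if c = '`' then scanC rest else c :: scanC rest := by
  rw [scanC.eq_def]
  dsimp only
  rw [if_neg hc]

theorem main_go : ∀ (n : Nat) (cs : List Char), cs.length ≤ n → removeDiscordC cs = scanC cs := by
  intro n
  induction n with
  | zero =>
    intro cs h
    have : cs = [] := List.length_eq_zero_iff.mp (Nat.le_zero.mp h)
    subst this; decide
  | succ n ih =>
    intro cs hlen
    cases cs with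
    | nil => decide
    | cons c rest =>
      obtain ⟨p, ps, h⟩ : ∃ p ps, PySem.Chars.splitOn rest ['\\', '\\'] = p :: ps := by
        cases h0 : PySem.Chars.splitOn rest ['\\', '\\'] with
        | nil => exact absurd h0 (splitOn_ne_nil rest _)
        | cons p ps => exact ⟨p, ps, rfl⟩
      by_cases hc : c = '\\'
      · subst hc
        cases rest with
        | nil => decide
        | cons d r =>
          by_cases hd : d = '\\'
          · subst hd
            rw [F_bb, ih r (by simp at hlen; omega)]
            rfl
          · obtain ⟨q, qs, hq⟩ : ∃ q qs, PySem.Chars.splitOn r ['\\', '\\'] = q :: qs := by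
              cases h0 : PySem.Chars.splitOn r ['\\', '\\'] with
              | nil => exact absurd h0 (splitOn_ne_nil r _)
              | cons q qs => exact ⟨q, qs, rfl⟩
            have hpd : List.isPrefixOf ['\\', '\\'] (d :: r) = false := by
              simp [List.isPrefixOf, Ne.symm hd]
            have hdr : PySem.Chars.splitOn (d :: r) ['\\', '\\'] = (d :: q) :: qs := by
              rw [splitOn_cons _ _ _ hpd, hq]; rfl
            have hpb : List.isPrefixOf ['\\', '\\'] ('\\' :: d :: r) = false := by
              simp [List.isPrefixOf, Ne.symm hd]
            rw [F_cons _ _ _ _ hpb hdr]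
            have hFr : removeDiscordC r
                = removeUnescapedGravesC q
                  ++ qs.flatMap (fun m => ['\\', '\\'] ++ removeUnescapedGravesC m) :=
              F_eq _ _ _ hq
            rw [ih r (by simp at hlen; omega)] at hFr
            by_cases hg : d = '`'
            · subst hg
              rw [G_esc]
              rw [show scanC ('\\' :: '`' :: r) = '\\' :: '`' :: scanC r from rfl, hFr]
              simp
            · have h1 : List.isPrefixOf ['\\', '`'] ('\\' :: d :: q) = false := by
                simp [List.isPrefixOf, Ne.symm hg]
              have h2 : List.isPrefixOf ['\\', '`'] (d :: q) = false := by
                simp [List.isPrefixOf, Ne.symm hd]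
              rw [G_cons _ _ h1, G_cons _ _ h2]
              rw [if_neg (by decide : ¬('\\' = '`')), if_neg hg]
              rw [show scanC ('\\' :: d :: r) = '\\' :: d :: scanC r from rfl, hFr]
              simp
      · have hpb : List.isPrefixOf ['\\', '\\'] (c :: rest) = false := by
          simp [List.isPrefixOf, Ne.symm hc]
        rw [F_cons _ _ _ _ hpb h]
        have h2 : List.isPrefixOf ['\\', '`'] (c :: p) = false := by
          simp [List.isPrefixOf, Ne.symm hc]
        rw [G_cons _ _ h2]
        have hFr : removeDiscordC rest
            = removeUnescapedGravesC p
              ++ ps.flatMap (fun m => ['\\', '\\'] ++ removeUnescapedGravesC m) :=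
          F_eq _ _ _ h
        rw [ih rest (by simp at hlen; omega)] at hFr
        by_cases hg : c = '`'
        · subst hg
          rw [if_pos rfl, scanC_cons '`' rest (by decide), if_pos rfl, hFr]
          simp
        · rw [if_neg hg, scanC_cons c rest hc, if_neg hg, hFr]
          simp

theorem main_eq (cs : List Char) : removeDiscordC cs = scanC cs :=
  main_go cs.length cs le_rfl

-- ===== VERDICT (by name: the statement is the Claim_ definition above) =====
theorem remove_discord_coding_modifier_py_spec : Claim_equal_remove_discord_coding_modifier_py := by
  intro msg _
  unfold Spec_remove_discord_coding_modifier_py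
  unfold remove_discord_coding_modifier_py remove_discord_coding_modifier_py_alt
  rw [main_eq]
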